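-- pv_equiv track=rewrite | github.com/AdamZhouSE/pythonHomework | Code/CodeRecords/2841/60640/260638.py | calculate_v
-- ===== SOURCE A (Python) =====
-- def calculate_v(array, judge):
--     if len(array) == 1:
--         return array[0]
--     else:
--         new_arr = []
--         if judge:
--             for ii in range(0, len(array)-1, 2):
--                 new_arr.append(array[ii] | array[ii+1])
--             judge = False
--             return calculate_v(new_arr, judge)
--         else:
--             for ii in range(0, len(array)-1, 2):
--                 new_arr.append(array[ii] ^ array[ii+1])
--             judge = True
--             return calculate_v(new_arr, judge)
-- ===== SOURCE B (Python) =====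
-- def calculate_v(array, judge):
--     # Iterative: fold levels in a while-loop, pairing adjacent elements via zip on one iterator
--     while len(array) != 1:
--         it = iter(array)
--         array = [(x | y) if judge else (x ^ y) for x, y in zip(it, it)]
--         judge = not judge
--     return array[0]
-- ===== Notes on version B (the rewrite author's own statement) =====
-- stated objective: idiomatic
-- what changed: Replaced the recursion with two duplicated index-loop branches by a single while-loop that pairs adjacent elements with zip on one iterator and selects the operator per element, alternating the flag in place.
import Mathlib
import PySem

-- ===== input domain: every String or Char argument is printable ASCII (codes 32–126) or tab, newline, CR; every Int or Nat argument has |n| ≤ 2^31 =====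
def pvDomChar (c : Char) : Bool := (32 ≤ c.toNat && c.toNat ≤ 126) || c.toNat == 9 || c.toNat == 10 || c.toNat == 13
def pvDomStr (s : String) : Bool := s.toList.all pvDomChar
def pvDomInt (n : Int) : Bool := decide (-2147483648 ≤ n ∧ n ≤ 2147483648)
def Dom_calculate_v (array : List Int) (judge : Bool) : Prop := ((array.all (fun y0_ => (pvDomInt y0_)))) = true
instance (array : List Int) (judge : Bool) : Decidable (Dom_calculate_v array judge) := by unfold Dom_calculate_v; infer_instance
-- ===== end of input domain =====

-- B replaces A's recursion with duplicated per-branch index loops by an iterative while-loop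
-- pairing adjacent elements (zip on one iterator) with the operator chosen per element (idiomatic).


-- ===== PORT A =====
-- for ii in range(0, len(array)-1, 2): new_arr.append(op(array[ii], array[ii+1]))
def pairFold (array : List Int) (op : Int → Int → Int) : List Int :=
  (PySem.List.pyRange 0 ((array.length : Int) - 1) 2).foldl
    (fun acc ii => acc ++ [op (PySem.List.pyGetD array ii 0) (PySem.List.pyGetD array (ii + 1) 0)]) []

theorem pairFold_length (array : List Int) (op : Int → Int → Int) :
    (pairFold array op).length = array.length / 2 := by
  unfold pairFold
  rw [PySem.List.foldl_append_singleton_eq_map, PySem.List.pyRange_of_pos 0 ((array.length : Int) - 1) (by norm_num)]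
  simp only [List.nil_append, List.length_map, List.length_range]
  split_ifs with h <;> omega

def calculate_v (array : List Int) (judge : Bool) : Int :=
  if array.length = 1 then PySem.List.pyGetD array 0 0
  else
    if array = [] then 0  -- totality guard: Python A recurses forever (RecursionError) on []; excluded by Pre_
    else if judge then
      calculate_v (pairFold array PySem.Int.bor) false
    else
      calculate_v (pairFold array PySem.Int.bxor) true
termination_by array.length
decreasing_by
  all_goals
    rw [pairFold_length]
    rename_i h1 h2 _
    have hp : 0 < array.length := List.length_pos_of_ne_nil h2
    omega

-- ===== PORT B =====
-- zip(it, it) on a single iterator: adjacent pairs, trailing odd element dropped (hand port, exact)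
def pairZip : List Int → List (Int × Int)
  | a :: b :: rest => (a, b) :: pairZip rest
  | _ => []

theorem pairZip_length : ∀ (xs : List Int), (pairZip xs).length = xs.length / 2
  | [] => by simp [pairZip]
  | [_] => by simp [pairZip]
  | _ :: _ :: rest => by simp [pairZip, pairZip_length rest]; omega

def calculate_v_alt (array : List Int) (judge : Bool) : Int :=
  if array.length = 1 then PySem.List.pyGetD array 0 0
  else
    if array = [] then 0  -- totality guard: B's while-loop never terminates on []; excluded by Pre_
    else
      calculate_v_alt
        ((pairZip array).map (fun p => if judge then PySem.Int.bor p.1 p.2 else PySem.Int.bxor p.1 p.2)) (!judge)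
termination_by array.length
decreasing_by
  rw [List.length_map, pairZip_length]
  rename_i h1 h2
  have hp : 0 < array.length := List.length_pos_of_ne_nil h2
  omega

-- ===== PRECONDITION & SPEC =====
-- Pre_ excludes only the empty list, on which A raises RecursionError (and B's loop never exits).
def Pre_calculate_v (array : List Int) (judge : Bool) : Prop := array ≠ []
instance (array : List Int) (judge : Bool) : Decidable (Pre_calculate_v array judge) := by
  unfold Pre_calculate_v; infer_instance

def pvWitness_calculate_v : List Int × Bool := ([1, 2, 3], true)

def Spec_calculate_v (array : List Int) (judge : Bool) (out : Int) : Prop := out = calculate_v_alt array judge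
instance (array : List Int) (judge : Bool) (out : Int) : Decidable (Spec_calculate_v array judge out) := by unfold Spec_calculate_v; infer_instance

-- ===== CLAIM (what is proved, stated in full; the proofs are below) =====
def Claim_equal_calculate_v : Prop := ∀ (array : List Int) (judge : Bool), Dom_calculate_v array judge → Pre_calculate_v array judge → Spec_calculate_v array judge (calculate_v array judge)

-- ===== LEMMAS AND PROOFS =====

-- the two per-level constructions agree
theorem range_pairs_eq_pairZip : ∀ (xs : List Int) (op : Int → Int → Int),
    (List.range (xs.length / 2)).map
      (fun k => op (xs.getD (2 * k) 0) (xs.getD (2 * k + 1) 0)) =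
    (pairZip xs).map (fun p => op p.1 p.2)
  | [], _ => by simp [pairZip]
  | [_], _ => by simp [pairZip]
  | a :: b :: rest, op => by
    have hlen : (a :: b :: rest).length / 2 = rest.length / 2 + 1 := by
      simp; omega
    rw [hlen, List.range_succ_eq_map]
    simp only [List.map_cons, List.map_map, pairZip]
    congr 1
    rw [← range_pairs_eq_pairZip rest op]
    apply List.map_congr_left
    intro k _
    simp only [Function.comp_apply, Nat.succ_eq_add_one]
    have e1 : (a :: b :: rest).getD (2 * (k + 1)) 0 = rest.getD (2 * k) 0 := by
      rw [show 2 * (k + 1) = 2 * k + 1 + 1 by ring]; rfl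
    have e2 : (a :: b :: rest).getD (2 * (k + 1) + 1) 0 = rest.getD (2 * k + 1) 0 := by
      rw [show 2 * (k + 1) + 1 = 2 * k + 1 + 1 + 1 by ring]; rfl
    rw [e1, e2]

theorem pairFold_eq_pairZip (xs : List Int) (op : Int → Int → Int) :
    pairFold xs op = (pairZip xs).map (fun p => op p.1 p.2) := by
  unfold pairFold
  rw [PySem.List.foldl_append_singleton_eq_map,
      PySem.List.pyRange_of_pos 0 ((xs.length : Int) - 1) (by norm_num)]
  rw [List.map_map, ← range_pairs_eq_pairZip xs op]
  have hcnt : (if (0 : Int) < (xs.length : Int) - 1 then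
      (((xs.length : Int) - 1 - 0 + 2 - 1) / 2).toNat else 0) = xs.length / 2 := by
    split_ifs with h
    · omega
    · omega
  rw [hcnt]
  apply List.map_congr_left
  intro k hk
  simp only [Function.comp_apply, zero_add]
  have h2k : (2 : Int) * (k : Int) = ((2 * k : Nat) : Int) := by push_cast; ring
  have h2k1 : (2 : Int) * (k : Int) + 1 = ((2 * k + 1 : Nat) : Int) := by push_cast; ring
  rw [h2k]
  rw [show ((2 * k : Nat) : Int) + 1 = ((2 * k + 1 : Nat) : Int) by push_cast; ring]
  rw [PySem.List.pyGetD_natCast, PySem.List.pyGetD_natCast]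

theorem calc_eq : ∀ (n : ℕ) (xs : List Int) (j : Bool), xs.length = n →
    calculate_v xs j = calculate_v_alt xs j := by
  intro n
  induction n using Nat.strong_induction_on with
  | _ n ih =>
    intro xs j hlen
    rw [calculate_v, calculate_v_alt]
    by_cases h1 : xs.length = 1
    · simp [h1]
    · by_cases h0 : xs = []
      · simp [h0]
      · have hp : 0 < xs.length := List.length_pos_of_ne_nil h0
        simp only [h1, h0, if_false]
        have hstep : ∀ (op : Int → Int → Int),
            pairFold xs op = (pairZip xs).map (fun p => op p.1 p.2) := pairFold_eq_pairZip xs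
        have hlt : (pairZip xs).length < n := by rw [pairZip_length]; omega
        cases j with
        | true =>
          simp only [if_true, Bool.not_true]
          rw [hstep]
          exact ih _ (by rw [List.length_map]; exact hlt)
            ((pairZip xs).map (fun p => PySem.Int.bor p.1 p.2)) false rfl
        | false =>
          simp only [Bool.false_eq_true, if_false, Bool.not_false]
          rw [hstep]
          exact ih _ (by rw [List.length_map]; exact hlt)
            ((pairZip xs).map (fun p => PySem.Int.bxor p.1 p.2)) true rfl

-- ===== VERDICT (by name: the statement is the Claim_ definition above) =====
theorem calculate_v_spec : Claim_equal_calculate_v := by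
  intro array judge _ _
  unfold Spec_calculate_v
  exact (calc_eq array.length array judge rfl)
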